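-- pv_equiv track=rewrite | github.com/reo11/AtCoder | atcoder/ARC/arc161/b.py | solve
-- ===== SOURCE A (Python) =====
-- def solve(n):
--     ans = []
--     while True:
--         if n < 3:
--             ans = -1
--             break
--         bin_list = list(str(bin(n)).replace("0b", ""))
--         # 上位ビットはできるだけ残す
--         one_count = bin_list.count("1")
--         if one_count >= 3:
--             # 3以上の場合は、上位ビットを残す
--             count = 0
--             for i in range(len(bin_list)):
--                 if count < 3 and bin_list[i] == "1":
--                     count += 1
--                     ans.append("1")
--                 else:
--                     ans.append("0")
--             ans = int("".join(ans), 2)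
--             break
--         else:
--             n -= 1
--     return ans
-- ===== SOURCE B (Python) =====
-- def solve(n):
--     if n < 7:
--         return -1
--     bits = [i for i in range(n.bit_length()) if (n >> i) & 1]
--     if len(bits) >= 3:
--         return sum(1 << i for i in bits[-3:])
--     a = n.bit_length() - 1
--     if len(bits) == 2 and bits[0] >= 2:
--         b = bits[0]
--         return (1 << a) + (1 << (b - 1)) + (1 << (b - 2))
--     return (1 << (a - 1)) + (1 << (a - 2)) + (1 << (a - 3))
-- ===== Notes on version B (the rewrite author's own statement) =====
-- stated objective: simpler
-- what changed: Replaces A's decrement-until-enough-set-bits loop over binary strings (rebuilt and rescanned each iteration, plus a masking pass and a base-two reparse) by a direct closed-form case analysis on n's set-bit positions: keep the top three set bits when there are enough, otherwise a power-of-two formula chosen by the number of set bits, with a sentinel for too-small n.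
import Mathlib
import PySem

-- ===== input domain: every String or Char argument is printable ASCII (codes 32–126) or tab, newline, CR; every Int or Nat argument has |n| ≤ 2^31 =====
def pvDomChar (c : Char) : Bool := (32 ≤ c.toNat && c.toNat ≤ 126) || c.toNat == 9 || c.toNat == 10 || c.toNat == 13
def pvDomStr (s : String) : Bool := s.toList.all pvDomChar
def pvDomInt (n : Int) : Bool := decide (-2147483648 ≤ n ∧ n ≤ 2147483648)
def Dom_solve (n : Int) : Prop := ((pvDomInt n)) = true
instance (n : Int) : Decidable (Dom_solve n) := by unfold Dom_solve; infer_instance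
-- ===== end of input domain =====

-- B replaces A's decrement loop over binary strings by a closed-form case analysis on n's set bits (objective: simpler).

-- ===== PORT A =====
-- binary digits of m, least significant first ([] for 0); helper for bin(n)
def binLSB : Nat → List Char
  | 0 => []
  | (m+1) => (if (m+1) % 2 = 1 then '1' else '0') :: binLSB ((m+1)/2)
decreasing_by exact Nat.div_lt_self (Nat.succ_pos m) (by decide)

-- list(str(bin(n)).replace("0b", "")); exact for n ≥ 1 (solve only builds it when n ≥ 3)
def pyBinDigits (m : Nat) : List Char := (binLSB m).reverse

-- int("".join(L), 2); exact for nonempty lists of '0'/'1' digits (all that solve parses)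
def parseBin (L : List Char) : Nat :=
  L.foldl (fun a c => 2 * a + (if c = '1' then 1 else 0)) 0

-- A's for-loop over range(len(bin_list)) with state (count, ans)
def keepLoop (L : List Char) : Nat × List Char :=
  L.foldl (fun st c =>
    if st.1 < 3 ∧ c = '1' then (st.1 + 1, st.2 ++ ['1']) else (st.1, st.2 ++ ['0']))
    (0, ([] : List Char))

def solve (n : Int) : Int :=
  if n < 3 then -1
  else
    let bin_list := pyBinDigits n.toNat
    let one_count := bin_list.count '1'
    if 3 ≤ one_count then Int.ofNat (parseBin (keepLoop bin_list).2)
    else solve (n - 1)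
termination_by n.toNat
decreasing_by omega

-- ===== PORT B =====
def solve_alt (n : Int) : Int :=
  if n < 7 then -1
  else
    -- bits = [i for i in range(n.bit_length()) if (n >> i) & 1]
    let bits := (List.range (PySem.Int.bitLength n)).filter
      (fun i : Nat => decide (PySem.Int.band (n >>> i) 1 ≠ 0))
    if 3 ≤ bits.length then
      -- sum(1 << i for i in bits[-3:]); drop is exact for bits[-3:] since 3 ≤ len(bits) here
      ((bits.drop (bits.length - 3)).map (fun i : Nat => (1 : Int) <<< i)).sum
    else
      let a := PySem.Int.bitLength n - 1
      if bits.length = 2 ∧ 2 ≤ bits.headD 0 then   -- bits[0], guarded by len(bits) == 2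
        let b := bits.headD 0
        (1 : Int) <<< a + (1 : Int) <<< (b - 1) + (1 : Int) <<< (b - 2)
      else
        (1 : Int) <<< (a - 1) + (1 : Int) <<< (a - 2) + (1 : Int) <<< (a - 3)

-- ===== PRECONDITION & SPEC =====
def Spec_solve (n : Int) (out : Int) : Prop := out = solve_alt n
instance (n : Int) (out : Int) : Decidable (Spec_solve n out) := by unfold Spec_solve; infer_instance

-- ===== CLAIM (what is proved, stated in full; the proofs are below) =====
def Claim_equal_solve : Prop := ∀ (n : Int), Dom_solve n → Spec_solve n (solve n)

-- ===== LEMMAS AND PROOFS =====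

-- proof-layer abbreviations
def BL (m : Nat) : Nat := PySem.Int.bitLength (m : Int)
def bitsOf (m : Nat) : List Nat := (List.range (BL m)).filter (fun i => m.testBit i)
def pc (m : Nat) : Nat := (binLSB m).count '1'
def top3 (m : Nat) : Nat := (((bitsOf m).drop ((bitsOf m).length - 3)).map (fun i => 2 ^ i)).sum

-- ---- basic recursions ----
theorem binLSB_eq (m : Nat) (h : 0 < m) :
    binLSB m = (if m % 2 = 1 then '1' else '0') :: binLSB (m / 2) := by
  cases m with
  | zero => omega
  | succ k => rw [binLSB]

theorem BL_zero : BL 0 = 0 := PySem.Int.bitLength_zero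

theorem BL_rec (m : Nat) (h : 0 < m) : BL m = BL (m / 2) + 1 :=
  PySem.Int.bitLength_natCast h

theorem binLSB_zero : binLSB 0 = [] := by rw [binLSB]

theorem pc_zero : pc 0 = 0 := by unfold pc; rw [binLSB_zero]; rfl

theorem pc_rec (m : Nat) (h : 0 < m) : pc m = m % 2 + pc (m / 2) := by
  unfold pc
  rw [binLSB_eq m h]
  by_cases hp : m % 2 = 1 <;> simp [hp] <;> omega

theorem pc_pos (m : Nat) (h : 0 < m) : 0 < pc m := by
  induction m using Nat.strong_induction_on with
  | _ m ih =>
    rw [pc_rec m h]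
    rcases Nat.eq_zero_or_pos (m % 2) with hp | hp
    · have h2 : 0 < m / 2 := by omega
      have := ih (m / 2) (by omega) h2
      omega
    · omega

theorem pc_eq_zero (m : Nat) (h : pc m = 0) : m = 0 := by
  by_contra hm
  have := pc_pos m (by omega)
  omega

-- pc m ≥ 2 → m ≥ 3 ; pc m ≥ 3 → m ≥ 7
theorem pc_two_le (m : Nat) (h : 2 ≤ pc m) : 3 ≤ m := by
  induction m using Nat.strong_induction_on with
  | _ m ih =>
    have hm : 0 < m := by
      by_contra hm
      have : m = 0 := by omega
      rw [this, pc_zero] at h; omega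
    rw [pc_rec m hm] at h
    rcases Nat.lt_or_ge (m % 2) 1 with hp | hp
    · have := ih (m / 2) (by omega) (by omega)
      omega
    · have h1 : 1 ≤ pc (m / 2) := by omega
      have : 0 < m / 2 := by
        by_contra hz
        have : m / 2 = 0 := by omega
        rw [this, pc_zero] at h1; omega
      omega

theorem pc_three_le (m : Nat) (h : 3 ≤ pc m) : 7 ≤ m := by
  induction m using Nat.strong_induction_on with
  | _ m ih =>
    have hm : 0 < m := by
      by_contra hm
      have : m = 0 := by omega
      rw [this, pc_zero] at h; omega
    rw [pc_rec m hm] at h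
    rcases Nat.lt_or_ge (m % 2) 1 with hp | hp
    · have := ih (m / 2) (by omega) (by omega)
      omega
    · have := pc_two_le (m / 2) (by omega)
      omega

-- ---- bitsOf structure ----
theorem testBit_mod2 (m i : Nat) : m.testBit i = decide ((m >>> i) % 2 = 1) := by
  induction i generalizing m with
  | zero => simp [Nat.testBit_zero]
  | succ k ih => rw [Nat.testBit_succ, ih]; congr 1; simp [Nat.shiftRight_succ_inside]

theorem bitsOf_zero : bitsOf 0 = [] := by
  simp [bitsOf, BL_zero]

theorem bitsOf_rec (m : Nat) (h : 0 < m) :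
    bitsOf m = (if m % 2 = 1 then [0] else []) ++ (bitsOf (m / 2)).map (· + 1) := by
  unfold bitsOf
  rw [BL_rec m h, List.range_succ_eq_map, List.filter_cons]
  have hmap : List.map Nat.succ (List.range (BL (m / 2))) =
      List.map (· + 1) (List.range (BL (m / 2))) := by
    simp [Nat.succ_eq_add_one]
  rw [hmap, List.filter_map]
  have hpred : List.filter ((fun i => m.testBit i) ∘ (· + 1)) (List.range (BL (m / 2))) =
      List.filter (fun i => (m / 2).testBit i) (List.range (BL (m / 2))) := by
    apply List.filter_congr
    intro x _
    simp [Function.comp, Nat.testBit_succ]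
  rw [hpred]
  by_cases hp : m % 2 = 1 <;> simp [Nat.testBit_zero, hp]

theorem len_bitsOf (m : Nat) : (bitsOf m).length = pc m := by
  induction m using Nat.strong_induction_on with
  | _ m ih =>
    rcases Nat.eq_zero_or_pos m with h0 | h0
    · rw [h0, bitsOf_zero, pc_zero]; rfl
    · rw [bitsOf_rec m h0, pc_rec m h0, List.length_append, List.length_map,
        ih (m / 2) (by omega)]
      by_cases hp : m % 2 = 1 <;> simp [hp]
      omega

theorem sum_bitsOf (m : Nat) : ((bitsOf m).map (fun i => 2 ^ i)).sum = m := by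
  induction m using Nat.strong_induction_on with
  | _ m ih =>
    rcases Nat.eq_zero_or_pos m with h0 | h0
    · rw [h0, bitsOf_zero]; rfl
    · rw [bitsOf_rec m h0]
      have hdouble : ∀ l : List Nat,
          (l.map (fun i => 2 ^ (i + 1))).sum = 2 * (l.map (fun i => 2 ^ i)).sum := by
        intro l
        induction l with
        | nil => rfl
        | cons x t iht =>
          simp only [List.map_cons, List.sum_cons]
          rw [iht]
          simp only [pow_succ]
          omega
      rw [List.map_append, List.sum_append, List.map_map]
      have : ((bitsOf (m / 2)).map ((fun i => 2 ^ i) ∘ (· + 1))).sum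
          = 2 * ((bitsOf (m / 2)).map (fun i => 2 ^ i)).sum := by
        simpa [Function.comp] using hdouble (bitsOf (m / 2))
      rw [this, ih (m / 2) (by omega)]
      by_cases hp : m % 2 = 1 <;> simp [hp] <;> omega

theorem top3_small (m : Nat) (h : pc m ≤ 3) : top3 m = m := by
  unfold top3
  rw [len_bitsOf]
  have : pc m - 3 = 0 := by omega
  rw [this, List.drop_zero, sum_bitsOf]

theorem top3_zero : top3 0 = 0 := top3_small 0 (by rw [pc_zero]; omega)

theorem top3_rec (m : Nat) (h : 0 < m) :
    top3 m = 2 * top3 (m / 2) + (if m % 2 = 1 ∧ pc (m / 2) < 3 then 1 else 0) := by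
  have hdouble : ∀ l : List Nat,
      (l.map ((fun i => 2 ^ i) ∘ (· + 1))).sum = 2 * (l.map (fun i => 2 ^ i)).sum := by
    intro l
    induction l with
    | nil => rfl
    | cons x t iht =>
      simp only [List.map_cons, List.sum_cons]
      rw [iht]
      simp only [Function.comp_apply, pow_succ]
      omega
  by_cases hp : m % 2 = 1
  · by_cases h3 : pc (m / 2) < 3
    · have hm3 : pc m ≤ 3 := by rw [pc_rec m h]; omega
      rw [top3_small m hm3, top3_small (m / 2) (by omega)]
      simp only [hp, h3, and_self, if_pos]
      omega
    · -- pc (m/2) ≥ 3 : the appended low bit 0 is dropped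
      have e1 : (if m % 2 = 1 then ([0] : List Nat) else []) = [0] := by simp [hp]
      have hge : 3 ≤ (bitsOf (m / 2)).length := by rw [len_bitsOf]; omega
      unfold top3
      rw [bitsOf_rec m h, e1, List.singleton_append, List.length_cons, List.length_map]
      have hk : (bitsOf (m / 2)).length + 1 - 3 = ((bitsOf (m / 2)).length - 3) + 1 := by
        omega
      rw [hk, List.drop_succ_cons, ← List.map_drop, List.map_map, hdouble]
      simp [hp, h3]
  · -- even
    have e1 : (if m % 2 = 1 then ([0] : List Nat) else []) = [] := by simp [hp]
    unfold top3
    rw [bitsOf_rec m h, e1, List.nil_append, List.length_map, ← List.map_drop,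
      List.map_map, hdouble]
    simp [hp]


-- ---- A's inner pass: the for-loop keeps the first three '1's (MSB side) ----
def maskL : Nat → List Char → List Char
  | _, [] => []
  | k, c :: t => if k < 3 ∧ c = '1' then '1' :: maskL (k + 1) t else '0' :: maskL k t

def msum : Nat → List Char → Nat
  | _, [] => 0
  | k, c :: t => if k < 3 ∧ c = '1' then 2 ^ t.length + msum (k + 1) t else msum k t

theorem keepLoop_foldl (L : List Char) : ∀ (k : Nat) (acc : List Char),
    (L.foldl (fun st c =>
        if st.1 < 3 ∧ c = '1' then (st.1 + 1, st.2 ++ ['1']) else (st.1, st.2 ++ ['0']))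
      (k, acc)).2 = acc ++ maskL k L := by
  induction L with
  | nil => intro k acc; simp [maskL]
  | cons c t ih =>
    intro k acc
    by_cases hc : k < 3 ∧ c = '1' <;> simp only [List.foldl_cons, hc, maskL, if_true,
      if_false, iff_true, iff_false, ite_true, ite_false] <;> rw [ih] <;> simp

theorem maskL_length (L : List Char) : ∀ k, (maskL k L).length = L.length := by
  induction L with
  | nil => intro k; simp [maskL]
  | cons c t ih =>
    intro k
    by_cases hc : k < 3 ∧ c = '1' <;> simp [maskL, hc, ih]

theorem parse_foldl (L : List Char) : ∀ a : Nat,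
    L.foldl (fun a c => 2 * a + (if c = '1' then 1 else 0)) a
      = a * 2 ^ L.length + parseBin L := by
  induction L with
  | nil => intro a; simp [parseBin]
  | cons c t ih =>
    intro a
    have e : parseBin (c :: t) = (if c = '1' then 1 else 0) * 2 ^ t.length + parseBin t := by
      conv_lhs => unfold parseBin
      rw [List.foldl_cons, ih]
      ring
    rw [List.foldl_cons, ih, e, List.length_cons]
    ring

theorem parse_cons (c : Char) (t : List Char) :
    parseBin (c :: t) = (if c = '1' then 1 else 0) * 2 ^ t.length + parseBin t := by
  conv_lhs => unfold parseBin
  rw [List.foldl_cons, parse_foldl]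
  ring

theorem parse_maskL (L : List Char) : ∀ k, parseBin (maskL k L) = msum k L := by
  induction L with
  | nil => intro k; simp [maskL, msum, parseBin]
  | cons c t ih =>
    intro k
    by_cases hc : k < 3 ∧ c = '1'
    · rw [show maskL k (c :: t) = '1' :: maskL (k + 1) t from by simp [maskL, hc],
        show msum k (c :: t) = 2 ^ t.length + msum (k + 1) t from by simp [msum, hc],
        parse_cons]
      simp [maskL_length, ih]
    · rw [show maskL k (c :: t) = '0' :: maskL k t from by simp [maskL, hc],
        show msum k (c :: t) = msum k t from by simp [msum, hc],
        parse_cons]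
      simp [maskL_length, ih]

theorem msum_append (A : List Char) (d : Char) : ∀ k,
    msum k (A ++ [d]) = 2 * msum k A + (if d = '1' ∧ k + A.count '1' < 3 then 1 else 0) := by
  induction A with
  | nil =>
    intro k
    simp only [List.nil_append, msum, List.count_nil, Nat.add_zero, Nat.mul_zero,
      Nat.zero_add, List.length_nil, pow_zero]
    by_cases hd : d = '1' <;> by_cases hk : k < 3 <;> simp [hd, hk]
  | cons c t ih =>
    intro k
    by_cases hc : k < 3 ∧ c = '1'
    · rw [show msum k ((c :: t) ++ [d]) = 2 ^ (t ++ [d]).length + msum (k + 1) (t ++ [d])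
          from by simp [msum, hc],
        show msum k (c :: t) = 2 ^ t.length + msum (k + 1) t from by simp [msum, hc],
        ih (k + 1),
        show List.count '1' (c :: t) = List.count '1' t + 1 from by
          simp [List.count_cons, hc.2]]
      have harith : k + 1 + List.count '1' t = k + (List.count '1' t + 1) := by omega
      rw [harith]
      generalize (if d = '1' ∧ k + (List.count '1' t + 1) < 3 then 1 else 0) = e
      simp only [List.length_append, List.length_cons, List.length_nil, Nat.zero_add,
        pow_succ]
      omega
    · rw [show msum k ((c :: t) ++ [d]) = msum k (t ++ [d]) from by simp [msum, hc],
        show msum k (c :: t) = msum k t from by simp [msum, hc],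
        ih k]
      by_cases hcc : c = '1'
      · have hk : ¬ k < 3 := fun hk => hc ⟨hk, hcc⟩
        have h1 : ¬ (d = '1' ∧ k + List.count '1' t < 3) := by
          rintro ⟨_, hx⟩; omega
        have h2 : ¬ (d = '1' ∧ k + List.count '1' (c :: t) < 3) := by
          rintro ⟨_, hx⟩
          have := List.count_le_length (a := '1') (l := c :: t)
          omega
        rw [if_neg h1, if_neg h2]
      · have hcnt : List.count '1' (c :: t) = List.count '1' t := by
          simp [List.count_cons, hcc]
        rw [hcnt]

theorem count_pyBin (m : Nat) : (pyBinDigits m).count '1' = pc m := by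
  unfold pyBinDigits pc
  exact List.count_reverse

theorem msum_pyBin (m : Nat) : msum 0 (pyBinDigits m) = top3 m := by
  induction m using Nat.strong_induction_on with
  | _ m ih =>
    rcases Nat.eq_zero_or_pos m with h0 | h0
    · rw [h0]
      unfold pyBinDigits
      rw [binLSB_zero]
      simp [msum, top3_zero]
    · unfold pyBinDigits
      rw [binLSB_eq m h0, List.reverse_cons, msum_append,
        show (binLSB (m / 2)).reverse = pyBinDigits (m / 2) from rfl,
        count_pyBin, ih (m / 2) (by omega), top3_rec m h0]
      congr 1
      by_cases hp : m % 2 = 1 <;> simp [hp]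

theorem A_inner (m : Nat) : parseBin (keepLoop (pyBinDigits m)).2 = top3 m := by
  unfold keepLoop
  rw [keepLoop_foldl _ 0 [], List.nil_append, parse_maskL, msum_pyBin]

theorem solve_eq (n : Int) :
    solve n = if n < 3 then -1
      else if 3 ≤ pc n.toNat then Int.ofNat (top3 n.toNat) else solve (n - 1) := by
  conv_lhs => rw [solve]
  simp only [count_pyBin, A_inner]

-- ---- bridging port B's bit list to bitsOf ----
theorem shiftRight_natCast (m i : Nat) : ((m : Int) >>> i) = ((m >>> i : Nat) : Int) := by
  exact_mod_cast rfl

theorem one_shiftLeft_int (i : Nat) : ((1 : Int) <<< i) = ((2 ^ i : Nat) : Int) := by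
  simp [Int.shiftLeft_eq]

theorem bits_bridge (m : Nat) :
    (List.range (PySem.Int.bitLength (m : Int))).filter
        (fun i : Nat => decide (PySem.Int.band ((m : Int) >>> i) 1 ≠ 0)) = bitsOf m := by
  unfold bitsOf BL
  apply List.filter_congr
  intro i _
  rw [PySem.Int.band_one, shiftRight_natCast]
  have e : PySem.Int.mod ((m >>> i : Nat) : Int) 2 = (((m >>> i) % 2 : Nat) : Int) := by
    exact_mod_cast PySem.Int.mod_natCast (m >>> i) 2
  rw [e, testBit_mod2, decide_eq_decide]
  omega

theorem shift_sum (l : List Nat) :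
    (l.map (fun i : Nat => (1 : Int) <<< i)).sum = (((l.map (fun i => 2 ^ i)).sum : Nat) : Int) := by
  induction l with
  | nil => rfl
  | cons x t ih =>
    rw [List.map_cons, List.sum_cons, ih, one_shiftLeft_int]
    exact_mod_cast rfl

theorem alt_neg (n : Int) (h : n < 7) : solve_alt n = -1 := by
  unfold solve_alt
  rw [if_pos h]

theorem alt_eq1 (m : Nat) (h7 : 7 ≤ m) (h3 : 3 ≤ pc m) :
    solve_alt (m : Int) = (top3 m : Int) := by
  unfold solve_alt
  rw [if_neg (by omega : ¬ ((m : Int) < 7)), bits_bridge m,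
    if_pos (by rw [len_bitsOf]; omega : 3 ≤ (bitsOf m).length), shift_sum]
  unfold top3
  rfl

theorem alt_eq2 (m : Nat) (h7 : 7 ≤ m) (hlen : (bitsOf m).length = 2)
    (hb : 2 ≤ (bitsOf m).headD 0) :
    solve_alt (m : Int) =
      ((2 ^ (BL m - 1) + 2 ^ ((bitsOf m).headD 0 - 1) + 2 ^ ((bitsOf m).headD 0 - 2) : Nat) : Int) := by
  unfold solve_alt
  rw [if_neg (by omega : ¬ ((m : Int) < 7)), bits_bridge m,
    if_neg (by omega : ¬ 3 ≤ (bitsOf m).length), if_pos ⟨hlen, hb⟩]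
  simp only [one_shiftLeft_int, BL]
  push_cast
  ring

theorem alt_eq3 (m : Nat) (h7 : 7 ≤ m) (hlt : (bitsOf m).length < 3)
    (hnot : ¬ ((bitsOf m).length = 2 ∧ 2 ≤ (bitsOf m).headD 0)) :
    solve_alt (m : Int) =
      ((2 ^ (BL m - 1 - 1) + 2 ^ (BL m - 1 - 2) + 2 ^ (BL m - 1 - 3) : Nat) : Int) := by
  unfold solve_alt
  rw [if_neg (by omega : ¬ ((m : Int) < 7)), bits_bridge m,
    if_neg (by omega : ¬ 3 ≤ (bitsOf m).length), if_neg hnot]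
  simp only [one_shiftLeft_int, BL]
  push_cast
  ring


-- ---- values at powers of two and neighbours ----
theorem pc_pow (a : Nat) : pc (2 ^ a) = 1 := by
  induction a with
  | zero =>
    rw [pow_zero, pc_rec 1 (by omega)]
    norm_num [pc_zero]
  | succ k ih =>
    have h1 : (2 ^ k * 2) % 2 = 0 := by omega
    have h2 : (2 ^ k * 2) / 2 = 2 ^ k := by omega
    rw [pow_succ, pc_rec _ (by positivity), h1, h2, ih]

theorem BL_pow (a : Nat) : BL (2 ^ a) = a + 1 := by
  induction a with
  | zero =>
    rw [pow_zero, BL_rec 1 (by omega)]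
    norm_num [BL_zero]
  | succ k ih =>
    have h2 : (2 ^ k * 2) / 2 = 2 ^ k := by omega
    rw [pow_succ, BL_rec _ (by positivity), h2, ih]

theorem pc_pow_sub_one (a : Nat) : pc (2 ^ a - 1) = a := by
  induction a with
  | zero => simpa using pc_zero
  | succ k ih =>
    have h2 : (2 : Nat) ^ (k + 1) = 2 * 2 ^ k := by ring
    have hpos : 0 < (2 : Nat) ^ k := by positivity
    rw [pc_rec _ (by omega), show (2 ^ (k + 1) - 1) % 2 = 1 from by omega,
      show (2 ^ (k + 1) - 1) / 2 = 2 ^ k - 1 from by omega, ih]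
    omega

theorem pc_two_pow_add_sub_one (a b : Nat) (h : b < a) : pc (2 ^ a + 2 ^ b - 1) = b + 1 := by
  induction b generalizing a with
  | zero =>
    rw [pow_zero, Nat.add_sub_cancel, pc_pow]
  | succ k ih =>
    have ha1 : (2 : Nat) ^ (a - 1) * 2 = 2 ^ a := by
      rw [← pow_succ]; congr 1; omega
    have hk1 : (2 : Nat) ^ (k + 1) = 2 * 2 ^ k := by ring
    have hposk : 0 < (2 : Nat) ^ k := by positivity
    have hposa : 0 < (2 : Nat) ^ (a - 1) := by positivity
    rw [pc_rec _ (by omega), show (2 ^ a + 2 ^ (k + 1) - 1) % 2 = 1 from by omega,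
      show (2 ^ a + 2 ^ (k + 1) - 1) / 2 = 2 ^ (a - 1) + 2 ^ k - 1 from by omega,
      ih (a - 1) (by omega)]
    omega

theorem top3_pow_sub_one (a : Nat) (h : 3 ≤ a) :
    top3 (2 ^ a - 1) = 2 ^ (a - 1) + 2 ^ (a - 2) + 2 ^ (a - 3) := by
  induction a, h using Nat.le_induction with
  | base =>
    rw [top3_small _ (by rw [pc_pow_sub_one])]
    norm_num
  | succ a ha ih =>
    have h2 : (2 : Nat) ^ (a + 1) = 2 * 2 ^ a := by ring
    have hpos : 0 < (2 : Nat) ^ a := by positivity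
    rw [top3_rec _ (by omega), show (2 ^ (a + 1) - 1) % 2 = 1 from by omega,
      show (2 ^ (a + 1) - 1) / 2 = 2 ^ a - 1 from by omega]
    rw [if_neg (by rw [pc_pow_sub_one]; omega), ih]
    have e1 : (2 : Nat) ^ (a - 1) * 2 = 2 ^ a := by
      rw [← pow_succ]; congr 1; omega
    have e2 : (2 : Nat) ^ (a - 2) * 2 = 2 ^ (a - 1) := by
      rw [← pow_succ]; congr 1; omega
    have e3 : (2 : Nat) ^ (a - 3) * 2 = 2 ^ (a - 2) := by
      rw [← pow_succ]; congr 1; omega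
    have e4 : a + 1 - 1 = a := by omega
    have e5 : a + 1 - 2 = a - 1 := by omega
    have e6 : a + 1 - 3 = a - 2 := by omega
    rw [e4, e5, e6]
    omega

theorem top3_two_pow (b a : Nat) (hb : 2 ≤ b) (hab : b < a) :
    top3 (2 ^ a + 2 ^ b - 1) = 2 ^ a + 2 ^ (b - 1) + 2 ^ (b - 2) := by
  induction b, hb using Nat.le_induction generalizing a with
  | base =>
    rw [top3_small _ (by rw [pc_two_pow_add_sub_one a 2 hab])]
    have hpos : 0 < (2 : Nat) ^ a := by positivity
    norm_num
  | succ b hb ih =>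
    have ha1 : (2 : Nat) ^ (a - 1) * 2 = 2 ^ a := by
      rw [← pow_succ]; congr 1; omega
    have hb1 : (2 : Nat) ^ (b + 1) = 2 * 2 ^ b := by ring
    have hposb : 0 < (2 : Nat) ^ b := by positivity
    have hposa : 0 < (2 : Nat) ^ (a - 1) := by positivity
    rw [top3_rec _ (by omega), show (2 ^ a + 2 ^ (b + 1) - 1) % 2 = 1 from by omega,
      show (2 ^ a + 2 ^ (b + 1) - 1) / 2 = 2 ^ (a - 1) + 2 ^ b - 1 from by omega]
    rw [if_neg (by rw [pc_two_pow_add_sub_one (a - 1) b (by omega)]; omega),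
      ih (a - 1) (by omega)]
    have e2 : (2 : Nat) ^ (b - 1) * 2 = 2 ^ b := by
      rw [← pow_succ]; congr 1; omega
    have e3 : (2 : Nat) ^ (b - 2) * 2 = 2 ^ (b - 1) := by
      rw [← pow_succ]; congr 1; omega
    have e4 : b + 1 - 1 = b := by omega
    have e5 : b + 1 - 2 = b - 1 := by omega
    rw [e4, e5]
    omega

-- ---- structure of numbers with one or two set bits ----
theorem pc_one_struct (m : Nat) (h : pc m = 1) : m = 2 ^ (BL m - 1) ∧ 1 ≤ BL m := by
  induction m using Nat.strong_induction_on with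
  | _ m ih =>
    have hm : 0 < m := by
      by_contra hz
      rw [show m = 0 from by omega, pc_zero] at h
      omega
    rw [pc_rec m hm] at h
    by_cases hp : m % 2 = 1
    · have hz : pc (m / 2) = 0 := by omega
      have : m / 2 = 0 := pc_eq_zero _ hz
      have hm1 : m = 1 := by omega
      subst hm1
      rw [BL_rec 1 (by omega)]
      norm_num [BL_zero]
    · have h1 : pc (m / 2) = 1 := by omega
      obtain ⟨he, hge⟩ := ih (m / 2) (by omega) h1
      have hpow : (2 : Nat) ^ (BL (m / 2) - 1) * 2 = 2 ^ (BL (m / 2)) := by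
        rw [← pow_succ]; congr 1; omega
      rw [BL_rec m hm]
      constructor
      · have hm2 : m = 2 * (m / 2) := by omega
        conv_lhs => rw [hm2, he]
        rw [Nat.add_sub_cancel]
        omega
      · omega

theorem pc_two_struct (m : Nat) (h : pc m = 2) :
    ∃ a b : Nat, b < a ∧ m = 2 ^ a + 2 ^ b ∧ BL m = a + 1 ∧ (bitsOf m).headD 0 = b := by
  induction m using Nat.strong_induction_on with
  | _ m ih =>
    have hm : 0 < m := by
      by_contra hz
      rw [show m = 0 from by omega, pc_zero] at h
      omega
    have hrec := pc_rec m hm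
    by_cases hp : m % 2 = 1
    · have h1 : pc (m / 2) = 1 := by omega
      obtain ⟨he, hge⟩ := pc_one_struct (m / 2) h1
      refine ⟨BL (m / 2) - 1 + 1, 0, by omega, ?_, ?_, ?_⟩
      · rw [pow_succ, pow_zero, ← he]
        omega
      · rw [BL_rec m hm]
        omega
      · rw [bitsOf_rec m hm, if_pos hp]
        simp
    · have h2 : pc (m / 2) = 2 := by omega
      obtain ⟨a, b, hab, he, hBL, hhd⟩ := ih (m / 2) (by omega) h2
      refine ⟨a + 1, b + 1, by omega, ?_, ?_, ?_⟩
      · have hm2 : m = 2 * (m / 2) := by omega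
        rw [hm2, he, pow_succ, pow_succ]
        ring
      · rw [BL_rec m hm, hBL]
      · rw [bitsOf_rec m hm, if_neg hp, List.nil_append]
        have hne : bitsOf (m / 2) ≠ [] := by
          intro hnil
          have hl := len_bitsOf (m / 2)
          rw [hnil] at hl
          simp at hl
          omega
        cases hbit : bitsOf (m / 2) with
        | nil => exact absurd hbit hne
        | cons x xs =>
          rw [hbit] at hhd
          simp at hhd ⊢
          omega


-- ---- one decrement step does not change B's answer while popcount < 3 ----
theorem pow_le_of_le {a b : Nat} (h : a ≤ b) : (2 : Nat) ^ a ≤ 2 ^ b :=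
  Nat.pow_le_pow_right (by omega) h

theorem step (m : Nat) (h7 : 7 ≤ m) (hlt : pc m < 3) :
    solve_alt ((m : Int) - 1) = solve_alt (m : Int) := by
  have hcast : ((m : Int) - 1) = ((m - 1 : Nat) : Int) := by omega
  rw [hcast]
  have hp1 : 0 < pc m := pc_pos m (by omega)
  rcases (by omega : pc m = 1 ∨ pc m = 2) with h | h
  · -- m = 2^a
    obtain ⟨hm, hBL⟩ := pc_one_struct m h
    set a := BL m - 1 with ha
    have ha3 : 3 ≤ a := by
      by_contra hlt3
      have : (2 : Nat) ^ a ≤ 2 ^ 2 := pow_le_of_le (by omega)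
      omega
    have h8 : (2 : Nat) ^ 3 ≤ 2 ^ a := pow_le_of_le (by omega)
    rw [show m - 1 = 2 ^ a - 1 from by rw [hm]]
    rw [alt_eq1 (2 ^ a - 1) (by omega) (by rw [pc_pow_sub_one]; omega)]
    rw [top3_pow_sub_one a ha3]
    rw [alt_eq3 m h7 (by rw [len_bitsOf, h]; omega)
      (by rintro ⟨hl2, _⟩; rw [len_bitsOf, h] at hl2; omega)]
  · -- m = 2^a + 2^b
    obtain ⟨a, b, hab, hm, hBL, hhead⟩ := pc_two_struct m h
    by_cases hb2 : 2 ≤ b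
    · -- middle branch of B; m-1 regains popcount b+1 ≥ 3
      have ha3 : 3 ≤ a := by omega
      have h8 : (2 : Nat) ^ 3 ≤ 2 ^ a := pow_le_of_le (by omega)
      have hb0 : 0 < (2 : Nat) ^ b := by positivity
      rw [show m - 1 = 2 ^ a + 2 ^ b - 1 from by rw [hm]]
      rw [alt_eq1 (2 ^ a + 2 ^ b - 1) (by omega)
        (by rw [pc_two_pow_add_sub_one a b hab]; omega)]
      rw [top3_two_pow b a hb2 hab]
      rw [alt_eq2 m h7 (by rw [len_bitsOf, h]) (by rw [hhead]; omega)]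
      rw [hhead, hBL]
      norm_num
    · -- b ∈ {0,1}: both sides take B's last branch with the same top bit a
      have ha3 : 3 ≤ a := by
        by_contra hlt3
        have h1 : (2 : Nat) ^ a ≤ 2 ^ 2 := pow_le_of_le (by omega)
        have h2 : (2 : Nat) ^ b ≤ 2 ^ 1 := pow_le_of_le (by omega)
        omega
      have h8 : (2 : Nat) ^ 3 ≤ 2 ^ a := pow_le_of_le (by omega)
      have e1 : (2 : Nat) ^ (a - 1) * 2 = 2 ^ a := by
        rw [← pow_succ]; congr 1; omega
      have ha0 : 0 < (2 : Nat) ^ (a - 1) := by positivity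
      rw [alt_eq3 m h7 (by rw [len_bitsOf, h]; omega)
        (by rintro ⟨_, hh⟩; rw [hhead] at hh; omega), hBL]
      rcases (by omega : b = 0 ∨ b = 1) with hb | hb
      · -- m - 1 = 2^a
        rw [show m - 1 = 2 ^ a from by rw [hm, hb]; omega]
        rw [alt_eq3 (2 ^ a) (by omega) (by rw [len_bitsOf, pc_pow]; omega)
          (by rintro ⟨hl2, _⟩; rw [len_bitsOf, pc_pow] at hl2; omega), BL_pow]
      · -- m - 1 = 2^a + 1
        have hq : pc (2 ^ a + 1) = 2 := by
          rw [pc_rec _ (by omega), show (2 ^ a + 1) % 2 = 1 from by omega,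
            show (2 ^ a + 1) / 2 = 2 ^ (a - 1) from by omega]
          rw [pc_pow]
        have hqh : (bitsOf (2 ^ a + 1)).headD 0 = 0 := by
          rw [bitsOf_rec _ (by omega), if_pos (by omega : (2 ^ a + 1) % 2 = 1)]
          simp
        have hqB : BL (2 ^ a + 1) = a + 1 := by
          rw [BL_rec _ (by omega), show (2 ^ a + 1) / 2 = 2 ^ (a - 1) from by omega,
            BL_pow]
          omega
        rw [show m - 1 = 2 ^ a + 1 from by rw [hm, hb]; omega]
        rw [alt_eq3 (2 ^ a + 1) (by omega) (by rw [len_bitsOf, hq]; omega)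
          (by rintro ⟨_, hh⟩; rw [hqh] at hh; omega), hqB]

-- ---- the main induction: peel decrements with solve_eq, stitch with step ----
theorem main_bounded (k : Nat) : ∀ n : Int, n.toNat ≤ k → solve n = solve_alt n := by
  induction k with
  | zero =>
    intro n hn
    rw [solve_eq n, if_pos (by omega : n < 3), alt_neg n (by omega)]
  | succ k ih =>
    intro n hn
    by_cases h3 : n < 3
    · rw [solve_eq n, if_pos h3, alt_neg n (by omega)]
    · have hmn : n = ((n.toNat : Nat) : Int) := by omega
      rw [solve_eq n, if_neg h3]
      by_cases hpc : 3 ≤ pc n.toNat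
      · have h7 : 7 ≤ n.toNat := pc_three_le _ hpc
        rw [if_pos hpc, hmn, alt_eq1 n.toNat h7 hpc]
        rfl
      · rw [if_neg hpc, ih (n - 1) (by omega)]
        by_cases h7 : n < 7
        · rw [alt_neg (n - 1) (by omega), alt_neg n h7]
        · rw [hmn]
          exact step n.toNat (by omega) (by omega)

theorem main (n : Int) : solve n = solve_alt n := main_bounded n.toNat n le_rfl




-- ===== VERDICT (by name: the statement is the Claim_ definition above) =====
theorem solve_spec : Claim_equal_solve := by
  intro n _
  exact main n
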